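-- pv_equiv track=rewrite | github.com/yh7004lee/blogger-autopost | app_iphone_id.py | _parse_srcset_urls
-- ===== SOURCE A (Python) =====
-- def _parse_srcset_urls(srcset: str):
--     """srcset 문자열에서 URL들만 깔끔히 분리"""
--     urls = []
--     for part in (srcset or "").split(","):
--         part = part.strip()
--         if not part:
--             continue
--         # "URL 2x" 또는 "URL 1000w" 형태 → 첫 토큰이 URL
--         url = part.split()[0]
--         if url.startswith("http"):
--             urls.append(url)
--     return urls
-- ===== SOURCE B (Python) =====
-- def _parse_srcset_urls(srcset: str):
--     """Single-pass state machine over the characters: no split/strip intermediates."""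
--     urls = []
--     state = 0  # 0 = before first token of segment, 1 = inside it, 2 = after it
--     tok = ""
--     for ch in (srcset or "") + ",":
--         if ch == ",":
--             if state != 0 and tok.startswith("http"):
--                 urls.append(tok)
--             state, tok = 0, ""
--         elif ch.isspace():
--             if state == 1:
--                 state = 2
--         elif state == 0:
--             state, tok = 1, ch
--         elif state == 1:
--             tok += ch
--     return urls
-- ===== Notes on version B (the rewrite author's own statement) =====
-- stated objective: alternative
-- what changed: Replaces A's split-on-comma loop with per-part strip() and split() by a single character-level state machine (one pass, no intermediate part/token lists) that tracks whether it is before, inside or after each segment's first token and flushes at every comma.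
import Mathlib
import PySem

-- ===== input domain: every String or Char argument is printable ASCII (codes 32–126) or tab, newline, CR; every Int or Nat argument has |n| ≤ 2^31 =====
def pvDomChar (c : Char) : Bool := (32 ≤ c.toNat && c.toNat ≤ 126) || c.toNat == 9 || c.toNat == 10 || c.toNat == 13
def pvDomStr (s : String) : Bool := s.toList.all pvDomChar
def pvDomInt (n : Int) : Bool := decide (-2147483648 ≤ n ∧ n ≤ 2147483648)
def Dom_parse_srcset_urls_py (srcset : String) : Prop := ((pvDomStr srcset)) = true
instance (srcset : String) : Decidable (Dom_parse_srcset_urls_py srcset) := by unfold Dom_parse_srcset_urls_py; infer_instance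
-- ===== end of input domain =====

-- B replaces A's split-on-comma / strip / split loop by a single character-level state machine
-- (one pass, no intermediate lists); objective: alternative (no measured speed claim).
-- Both programs are pure (no mutation); equivalence is about the return value.

-- ===== PORT A =====
-- A's loop body: part.strip(); skip empty; url = part.split()[0]; keep if url.startswith("http").
-- (The split()[0] IndexError branch is unreachable: part is non-empty after strip, so split() is non-empty.)
def aBody (urls : List (List Char)) (part : List Char) : List (List Char) :=
  let p := PySem.Chars.strip part
  if p = [] then urls
  else
    match PySem.Chars.split₀ p with
    | [] => urls          -- unreachable (Python IndexError would be here)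
    | url :: _ => if PySem.Chars.startswith url ['h','t','t','p'] then urls ++ [url] else urls

-- `(srcset or "")` is the identity on strings ("" or "" == ""); strings are handled on the
-- List Char side (PySem.Chars), with String.ofList applied to the collected urls at the end.
def parse_srcset_urls_py (srcset : String) : List String :=
  ((PySem.Chars.splitOn srcset.toList [',']).foldl aBody []).map String.ofList

-- ===== PORT B =====
-- B's per-character step: state 0 = before the segment's first token, 1 = inside it, 2 = after it.
def altStep (acc : List (List Char) × Nat × List Char) (c : Char) :
    List (List Char) × Nat × List Char :=
  match acc with
  | (urls, st, tok) =>
    if c = ',' then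
      (if st ≠ 0 ∧ PySem.Chars.startswith tok ['h','t','t','p'] = true then urls ++ [tok] else urls, 0, [])
    else if PySem.Chars.isspace c then
      (urls, if st = 1 then 2 else st, tok)
    else if st = 0 then (urls, 1, [c])
    else if st = 1 then (urls, 1, tok ++ [c])
    else (urls, st, tok)

def parse_srcset_urls_py_alt (srcset : String) : List String :=
  (((srcset.toList ++ [',']).foldl altStep ([], 0, [])).1).map String.ofList

-- ===== PRECONDITION & SPEC =====
def Spec_parse_srcset_urls_py (srcset : String) (out : List String) : Prop := out = parse_srcset_urls_py_alt srcset
instance (srcset : String) (out : List String) : Decidable (Spec_parse_srcset_urls_py srcset out) := by unfold Spec_parse_srcset_urls_py; infer_instance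

-- ===== CLAIM (what is proved, stated in full; the proofs are below) =====
def Claim_equal_parse_srcset_urls_py : Prop := ∀ (srcset : String), Dom_parse_srcset_urls_py srcset → Spec_parse_srcset_urls_py srcset (parse_srcset_urls_py srcset)

-- ===== LEMMAS AND PROOFS =====

-- Reference (accumulator-free) versions of str.split(",") and str.split().
def mySplit (pre : List Char) : List Char → List (List Char)
  | [] => [pre]
  | c :: rest => if c = ',' then pre :: mySplit [] rest else mySplit (pre ++ [c]) rest

def mySplit₀ (cur : List Char) : List Char → List (List Char)
  | [] => if cur = [] then [] else [cur]
  | c :: rest =>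
    if PySem.Chars.isspace c then
      if cur = [] then mySplit₀ [] rest else cur :: mySplit₀ [] rest
    else mySplit₀ (cur ++ [c]) rest

lemma go_splitOn (fuel : Nat) : ∀ (l cur : List Char) (acc : List (List Char)),
    l.length ≤ fuel →
    PySem.Chars.splitOn.go [','] fuel l cur acc = acc.reverse ++ mySplit cur.reverse l := by
  induction fuel with
  | zero =>
    intro l cur acc h
    have : l = [] := List.length_eq_zero_iff.mp (Nat.le_zero.mp h)
    subst this
    simp [PySem.Chars.splitOn.go, mySplit]
  | succ n ih =>
    intro l cur acc h
    cases l with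
    | nil => simp [PySem.Chars.splitOn.go, mySplit]
    | cons c rest =>
      by_cases hc : c = ','
      · subst hc
        have hpre : List.isPrefixOf [','] (',' :: rest) = true := by
          simp [List.isPrefixOf]
        rw [PySem.Chars.splitOn.go]
        simp only [hpre, if_true]
        rw [show List.drop (List.length [',']) (',' :: rest) = rest from rfl]
        rw [ih rest [] (cur.reverse :: acc) (by simpa using Nat.le_of_succ_le_succ h)]
        simp [mySplit]
      · have hpre : List.isPrefixOf [','] (c :: rest) = false := by
          simp [List.isPrefixOf, Ne.symm hc]
        rw [PySem.Chars.splitOn.go]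
        simp only [hpre, Bool.false_eq_true, if_false]
        rw [ih rest (c :: cur) acc (by simpa using Nat.le_of_succ_le_succ h)]
        simp [mySplit, hc]

lemma splitOn_comma (cs : List Char) : PySem.Chars.splitOn cs [','] = mySplit [] cs := by
  unfold PySem.Chars.splitOn
  rw [go_splitOn (cs.length + 1) cs [] [] (Nat.le_succ _)]
  simp

lemma go_split₀ : ∀ (l cur : List Char) (acc : List (List Char)),
    PySem.Chars.split₀.go l cur acc = acc.reverse ++ mySplit₀ cur.reverse l := by
  intro l
  induction l with
  | nil =>
    intro cur acc
    cases cur <;> simp [PySem.Chars.split₀.go, mySplit₀, List.isEmpty]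
  | cons c rest ih =>
    intro cur acc
    by_cases hs : PySem.Chars.isspace c = true
    · cases cur with
      | nil =>
        rw [PySem.Chars.split₀.go]
        simp [hs, ih, mySplit₀]
      | cons d ds =>
        rw [PySem.Chars.split₀.go]
        simp only [hs, if_true, List.isEmpty_cons, Bool.false_eq_true, if_false]
        rw [ih]
        simp [mySplit₀, hs]
    · rw [PySem.Chars.split₀.go]
      simp only [hs, Bool.false_eq_true, if_false]
      rw [ih]
      simp [mySplit₀, hs]

lemma split₀_eq (l : List Char) : PySem.Chars.split₀ l = mySplit₀ [] l := by
  unfold PySem.Chars.split₀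
  rw [go_split₀]
  simp

lemma mySplit₀_dropWhile (l : List Char) :
    mySplit₀ [] l = mySplit₀ [] (l.dropWhile PySem.Chars.isspace) := by
  induction l with
  | nil => simp
  | cons c rest ih =>
    by_cases hs : PySem.Chars.isspace c = true
    · rw [List.dropWhile_cons_of_pos hs]
      rw [← ih]
      simp [mySplit₀, hs]
    · rw [List.dropWhile_cons_of_neg (by simp [hs])]

lemma mySplit₀_spaces (t : List Char) : ∀ (cur : List Char),
    (∀ c ∈ t, PySem.Chars.isspace c = true) →
    mySplit₀ cur t = if cur = [] then [] else [cur] := by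
  induction t with
  | nil => intro cur _; rfl
  | cons c cs ih =>
    intro cur ht
    have hc : PySem.Chars.isspace c = true := ht c (by simp)
    have hcs : ∀ c ∈ cs, PySem.Chars.isspace c = true := fun c h => ht c (by simp [h])
    by_cases hcur : cur = []
    · simp [mySplit₀, hc, hcur, ih [] hcs]
    · simp [mySplit₀, hc, hcur, ih [] hcs]

lemma mySplit₀_append_spaces (l : List Char) : ∀ (cur t : List Char),
    (∀ c ∈ t, PySem.Chars.isspace c = true) → mySplit₀ cur (l ++ t) = mySplit₀ cur l := by
  induction l with
  | nil =>
    intro cur t ht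
    rw [List.nil_append, mySplit₀_spaces t cur ht]
    cases hcur : decide (cur = []) <;> simp_all [mySplit₀]
  | cons c rest ih =>
    intro cur t ht
    by_cases hs : PySem.Chars.isspace c = true
    · by_cases hcur : cur = [] <;>
        simp [mySplit₀, hs, hcur, ih _ t ht]
    · simp [mySplit₀, hs, ih _ t ht]

lemma rstrip_decomp (l : List Char) :
    l = PySem.Chars.rstrip l ++ (l.reverse.takeWhile PySem.Chars.isspace).reverse ∧
    (∀ c ∈ (l.reverse.takeWhile PySem.Chars.isspace).reverse, PySem.Chars.isspace c = true) := by
  constructor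
  · conv_lhs => rw [← l.reverse_reverse, ← List.takeWhile_append_dropWhile (p := PySem.Chars.isspace) (l := l.reverse)]
    rw [List.reverse_append]
    rfl
  · intro c hc
    rw [List.mem_reverse] at hc
    exact List.mem_takeWhile_imp hc

lemma mySplit₀_strip (part : List Char) :
    mySplit₀ [] (PySem.Chars.strip part) = mySplit₀ [] part := by
  have h1 : mySplit₀ [] part = mySplit₀ [] (PySem.Chars.lstrip part) := by
    rw [mySplit₀_dropWhile part]; rfl
  obtain ⟨hdec, hsp⟩ := rstrip_decomp (PySem.Chars.lstrip part)
  rw [h1]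
  conv_rhs => rw [hdec]
  rw [mySplit₀_append_spaces _ _ _ hsp]
  rfl

lemma mySplit₀_head (l : List Char) : ∀ (cur : List Char), cur ≠ [] →
    ∃ rest, mySplit₀ cur l = (cur ++ l.takeWhile (fun c => !PySem.Chars.isspace c)) :: rest := by
  induction l with
  | nil => intro cur h; exact ⟨[], by simp [mySplit₀, h]⟩
  | cons c cs ih =>
    intro cur h
    by_cases hs : PySem.Chars.isspace c = true
    · refine ⟨mySplit₀ [] cs, ?_⟩
      simp [mySplit₀, hs, h]
    · obtain ⟨rest, hrest⟩ := ih (cur ++ [c]) (by simp)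
      refine ⟨rest, ?_⟩
      simp [mySplit₀, hs, hrest]

def firstWord (part : List Char) : List Char :=
  (part.dropWhile PySem.Chars.isspace).takeWhile (fun c => !PySem.Chars.isspace c)

lemma mySplit₀_of_lstrip_ne (part : List Char) (h : part.dropWhile PySem.Chars.isspace ≠ []) :
    ∃ rest, mySplit₀ [] part = firstWord part :: rest := by
  rw [mySplit₀_dropWhile]
  cases hd : part.dropWhile PySem.Chars.isspace with
  | nil => exact absurd hd h
  | cons c r =>
    have hc : PySem.Chars.isspace c = false := by
      have := List.head_dropWhile_not PySem.Chars.isspace (l := part) (by rw [hd]; simp)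
      simpa [hd] using this
    obtain ⟨rest, hrest⟩ := mySplit₀_head r [c] (by simp)
    refine ⟨rest, ?_⟩
    rw [show mySplit₀ [] (c :: r) = mySplit₀ [c] r by simp [mySplit₀, hc]]
    rw [hrest]
    simp [firstWord, hd, hc]

lemma strip_eq_nil_of (part : List Char) (h : part.dropWhile PySem.Chars.isspace = []) :
    PySem.Chars.strip part = [] := by
  unfold PySem.Chars.strip PySem.Chars.lstrip
  rw [h]
  rfl

lemma strip_ne_nil_of (part : List Char) (h : part.dropWhile PySem.Chars.isspace ≠ []) :
    PySem.Chars.strip part ≠ [] := by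
  unfold PySem.Chars.strip PySem.Chars.rstrip PySem.Chars.lstrip
  intro hcon
  have h2 : (part.dropWhile PySem.Chars.isspace).reverse.dropWhile PySem.Chars.isspace = [] := by
    simpa using congrArg List.reverse hcon
  rw [List.dropWhile_eq_nil_iff] at h2
  cases hd : part.dropWhile PySem.Chars.isspace with
  | nil => exact h hd
  | cons c r =>
    have hc : PySem.Chars.isspace c = false := by
      have := List.head_dropWhile_not PySem.Chars.isspace (l := part) (by rw [hd]; simp)
      simpa [hd] using this
    have := h2 c (by simp [hd])
    simp [hc] at this

-- ---- B-side per-segment scan lemmas ----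
lemma scan_state2 (part : List Char) : ∀ (urls : List (List Char)) (tok : List Char),
    (',' ∉ part) → part.foldl altStep (urls, 2, tok) = (urls, 2, tok) := by
  induction part with
  | nil => intro urls tok _; rfl
  | cons c rest ih =>
    intro urls tok h
    have hc : ¬ (c = ',') := fun hh => h (by simp [hh])
    have hrest : ',' ∉ rest := fun hh => h (by simp [hh])
    by_cases hs : PySem.Chars.isspace c = true <;>
      simp [altStep, hc, hs, ih urls tok hrest]

lemma scan_state1 (part : List Char) : ∀ (urls : List (List Char)) (tok : List Char),
    (',' ∉ part) →
    part.foldl altStep (urls, 1, tok) =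
      (urls, if part.all (fun c => !PySem.Chars.isspace c) then 1 else 2,
       tok ++ part.takeWhile (fun c => !PySem.Chars.isspace c)) := by
  induction part with
  | nil => intro urls tok _; simp
  | cons c rest ih =>
    intro urls tok h
    have hc : ¬ (c = ',') := fun hh => h (by simp [hh])
    have hrest : ',' ∉ rest := fun hh => h (by simp [hh])
    by_cases hs : PySem.Chars.isspace c = true
    · simp [altStep, hc, hs, scan_state2 rest urls tok hrest, List.all_cons]
    · simp [altStep, hc, hs, ih urls (tok ++ [c]) hrest, List.all_cons]

lemma scan_state0 (part : List Char) (urls : List (List Char)) (h : ',' ∉ part) :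
    part.foldl altStep (urls, 0, []) =
      if part.dropWhile PySem.Chars.isspace = [] then (urls, 0, ([] : List Char))
      else (urls,
        if (part.dropWhile PySem.Chars.isspace).tail.all (fun c => !PySem.Chars.isspace c) then 1 else 2,
        firstWord part) := by
  induction part with
  | nil => simp
  | cons c rest ih =>
    have hc : ¬ (c = ',') := fun hh => h (by simp [hh])
    have hrest : ',' ∉ rest := fun hh => h (by simp [hh])
    by_cases hs : PySem.Chars.isspace c = true
    · rw [List.foldl_cons, show altStep (urls, 0, []) c = (urls, 0, []) by simp [altStep, hc, hs]]
      rw [ih hrest]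
      simp [hs, firstWord]
    · rw [List.foldl_cons, show altStep (urls, 0, []) c = (urls, 1, [c]) by simp [altStep, hc, hs]]
      rw [scan_state1 rest urls [c] hrest]
      simp [hs, firstWord]

-- Scanning one comma-free segment plus its terminating ',' performs exactly A's loop body.
lemma seg_flush (part : List Char) (urls : List (List Char)) (h : ',' ∉ part) :
    (part ++ [',']).foldl altStep (urls, 0, []) = (aBody urls part, 0, []) := by
  rw [List.foldl_append, scan_state0 part urls h]
  by_cases hd : part.dropWhile PySem.Chars.isspace = []
  · rw [if_pos hd]
    have : aBody urls part = urls := by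
      unfold aBody
      simp [strip_eq_nil_of part hd]
    simp [altStep, this]
  · rw [if_neg hd]
    obtain ⟨rest, hrest⟩ := mySplit₀_of_lstrip_ne part hd
    have hsplit : PySem.Chars.split₀ (PySem.Chars.strip part) = firstWord part :: rest := by
      rw [split₀_eq, mySplit₀_strip, hrest]
    have hbody : aBody urls part =
        if PySem.Chars.startswith (firstWord part) ['h','t','t','p'] then urls ++ [firstWord part] else urls := by
      unfold aBody
      rw [if_neg (strip_ne_nil_of part hd), hsplit]
    by_cases hst : (part.dropWhile PySem.Chars.isspace).tail.all (fun c => !PySem.Chars.isspace c) = true <;>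
      · simp only [hst, if_true, Bool.false_eq_true, if_false, List.foldl_cons, List.foldl_nil]
        by_cases hw : PySem.Chars.startswith (firstWord part) ['h','t','t','p'] = true <;>
          simp [altStep, hbody, hw]

lemma mySplit_no_comma (part : List Char) : ∀ (pre : List Char), (',' ∉ part) →
    mySplit pre part = [pre ++ part] := by
  induction part with
  | nil => intro pre _; simp [mySplit]
  | cons c rest ih =>
    intro pre h
    have hc : ¬ (c = ',') := fun hh => h (by simp [hh])
    have hrest : ',' ∉ rest := fun hh => h (by simp [hh])
    simp [mySplit, hc, ih (pre ++ [c]) hrest]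

lemma mySplit_comma (part : List Char) : ∀ (pre rest : List Char), (',' ∉ part) →
    mySplit pre (part ++ ',' :: rest) = (pre ++ part) :: mySplit [] rest := by
  induction part with
  | nil => intro pre rest _; simp [mySplit]
  | cons c cs ih =>
    intro pre rest h
    have hc : ¬ (c = ',') := fun hh => h (by simp [hh])
    have hcs : ',' ∉ cs := fun hh => h (by simp [hh])
    simp [mySplit, hc, ih (pre ++ [c]) rest hcs]

lemma main_scan : ∀ (n : Nat) (cs : List Char) (urls : List (List Char)), cs.length ≤ n →
    ((cs ++ [',']).foldl altStep (urls, 0, [])).1 = (mySplit [] cs).foldl aBody urls := by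
  intro n
  induction n with
  | zero =>
    intro cs urls h
    have : cs = [] := List.length_eq_zero_iff.mp (Nat.le_zero.mp h)
    subst this
    rw [seg_flush [] urls (by simp)]
    simp [mySplit]
  | succ n ih =>
    intro cs urls h
    have hdecomp : cs = cs.takeWhile (fun c => !(c = ',': Bool)) ++ cs.dropWhile (fun c => !(c = ',' : Bool)) :=
      (List.takeWhile_append_dropWhile).symm
    have hseg : ',' ∉ cs.takeWhile (fun c => !(c = ',' : Bool)) := by
      intro hmem
      have := List.mem_takeWhile_imp hmem
      simp at this
    cases hr : cs.dropWhile (fun c => !(c = ',' : Bool)) with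
    | nil =>
      have hcs : ',' ∉ cs := by
        rw [hdecomp, hr, List.append_nil]; exact hseg
      rw [seg_flush cs urls hcs, mySplit_no_comma cs [] hcs]
      simp
    | cons c rest =>
      have hc : c = ',' := by
        have := List.head_dropWhile_not (fun c => !(c = ',' : Bool)) (l := cs) (by simp [hr])
        simpa [hr] using this
      subst hc
      set seg := cs.takeWhile (fun c => !(c = ',' : Bool)) with hsegdef
      have hcs2 : cs = seg ++ ',' :: rest := by rw [hdecomp, hr]
      have hlen : rest.length ≤ n := by
        have := congrArg List.length hcs2
        simp at this
        omega
      rw [hcs2]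
      rw [show (seg ++ ',' :: rest) ++ [','] = (seg ++ [',']) ++ (rest ++ [',']) by simp]
      rw [List.foldl_append, seg_flush seg urls hseg]
      rw [mySplit_comma seg [] rest hseg]
      simp only [List.nil_append, List.foldl_cons]
      exact ih rest (aBody urls seg) hlen

-- ===== VERDICT (by name: the statement is the Claim_ definition above) =====
theorem parse_srcset_urls_py_spec : Claim_equal_parse_srcset_urls_py := by
  intro srcset _
  show _ = _
  unfold parse_srcset_urls_py parse_srcset_urls_py_alt
  rw [splitOn_comma, ← main_scan srcset.toList.length srcset.toList [] (Nat.le_refl _)]
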